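-- pv_equiv track=rewrite | github.com/foege99/BridgeAnalytics | bridge/lead_analysis.py | _normalize_hand_part
-- ===== SOURCE A (Python) =====
-- from typing import Optional
--
-- _RANK_ORDER = "AKQJT98765432"
--
-- _RANK_VALUE = {r: i for i, r in enumerate(_RANK_ORDER[::-1])}
--
-- _RANK_TRANSLATE = {"E": "A", "K": "K", "D": "Q", "B": "J", "T": "T"}
--
-- def _normalize_rank_token(token: object) -> Optional[str]:
--     if token is None:
--         return None
--     s = str(token).strip().upper()
--     if not s:
--         return None
--     if s.startswith("10"):
--         return "T"
--     first = s[0]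
--     first = _RANK_TRANSLATE.get(first, first)
--     return first if first in _RANK_ORDER else None
--
-- def _normalize_hand_part(part: str) -> list[str]:
--     if not part:
--         return []
--     clean = part.replace("-", "").replace("—", "").replace(" ", "").upper()
--     out: list[str] = []
--     i = 0
--     while i < len(clean):
--         if clean[i:i + 2] == "10":
--             out.append("T")
--             i += 2
--             continue
--         rank = _normalize_rank_token(clean[i])
--         if rank is not None:
--             out.append(rank)
--         i += 1
--     out = [r for r in out if r in _RANK_VALUE]
--     out.sort(key=lambda r: _RANK_VALUE[r], reverse=True)
--     return out
-- ===== SOURCE B (Python) =====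
-- _RANK_ORDER = "AKQJT98765432"
--
-- _RANK_TRANSLATE = {"E": "A", "K": "K", "D": "Q", "B": "J", "T": "T"}
--
-- def _normalize_hand_part(part: str) -> list[str]:
--     # Counting sort over the fixed 13-rank domain instead of parse-list + comparison sort.
--     if not part:
--         return []
--     clean = part.replace("-", "").replace("—", "").replace(" ", "").upper()
--     counts: dict[str, int] = {}
--     i = 0
--     n = len(clean)
--     while i < n:
--         if clean[i:i + 2] == "10":
--             counts["T"] = counts.get("T", 0) + 1
--             i += 2
--             continue
--         c = _RANK_TRANSLATE.get(clean[i], clean[i])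
--         if c in _RANK_ORDER:
--             counts[c] = counts.get(c, 0) + 1
--         i += 1
--     return [r for r in _RANK_ORDER for _ in range(counts.get(r, 0))]
-- ===== Notes on version B (the rewrite author's own statement) =====
-- stated objective: faster
-- what changed: B replaces A's collect-then-comparison-sort (build the token list, then sort it by _RANK_VALUE descending) with a counting sort: the same scan tallies ranks into a dict, and the output is emitted by walking the fixed descending rank string _RANK_ORDER and repeating each rank its counted number of times.
import Mathlib
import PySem

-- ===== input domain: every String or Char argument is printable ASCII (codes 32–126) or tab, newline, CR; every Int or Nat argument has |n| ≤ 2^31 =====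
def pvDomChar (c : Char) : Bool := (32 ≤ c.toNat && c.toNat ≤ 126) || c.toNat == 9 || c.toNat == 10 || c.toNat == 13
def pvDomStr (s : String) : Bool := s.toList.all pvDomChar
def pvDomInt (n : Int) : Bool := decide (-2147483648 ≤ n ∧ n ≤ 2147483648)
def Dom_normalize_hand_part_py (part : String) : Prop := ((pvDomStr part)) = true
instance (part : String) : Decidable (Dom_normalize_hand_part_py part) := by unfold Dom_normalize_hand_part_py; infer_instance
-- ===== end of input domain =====

-- B replaces A's "collect ranks, then comparison-sort by rank value" with a counting sort over the
-- fixed 13-rank domain (tally into a dict, emit along the descending rank string); same return value.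

-- ===== PORT A =====
-- module constants (shared by both sources)
def RANK_ORDER : String := "AKQJT98765432"

-- {r: i for i, r in enumerate(_RANK_ORDER[::-1])}; [::-1] is reverse (PySem.List.slice?_none_none_neg_one)
def RANK_VALUE : PySem.Dict String Int :=
  (PySem.List.enumerate RANK_ORDER.toList.reverse).foldl
    (fun d p => d.insert (String.ofList [p.2]) p.1) PySem.Dict.empty

def RANK_TRANSLATE : PySem.Dict String String :=
  PySem.Dict.ofList [("E", "A"), ("K", "K"), ("D", "Q"), ("B", "J"), ("T", "T")]

-- _normalize_rank_token; the call site only passes one-character strings (never None), so the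
-- 'token is None' branch is dropped; 'if not s' is the match on []; startswith "10" on the empty
-- string is False in Python, so checking it only in the nonempty branch is exact
def normalize_rank_token (token : String) : Option String :=
  let s := PySem.Str.upper (PySem.Str.strip token)
  match s.toList with
  | [] => none
  | c :: _ =>
    if PySem.Str.startswith s "10" then some "T"
    else
      let first := String.ofList [c]
      let first := PySem.Dict.getD RANK_TRANSLATE first first
      if PySem.Str.isIn first RANK_ORDER then some first else none

-- A's while loop over clean: clean[i:i+2] == "10" is the two-character prefix at i
def parse_loop : List Char → List String
  | '1' :: '0' :: rest => "T" :: parse_loop rest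
  | c :: rest =>
    match normalize_rank_token (String.ofList [c]) with
    | some r => r :: parse_loop rest
    | none => parse_loop rest
  | [] => []

def normalize_hand_part_py (part : String) : List String :=
  if part.toList = [] then []
  else
    let clean := PySem.Str.upper
      (PySem.Str.replace (PySem.Str.replace (PySem.Str.replace part "-" "") "—" "") " " "")
    let out := parse_loop clean.toList
    let out := out.filter (fun r => PySem.Dict.contains RANK_VALUE r)
    -- after the filter every element is a key of RANK_VALUE, so the sort key _RANK_VALUE[r]
    -- never raises; getD is exact on those elements
    PySem.List.sorted out (fun r => PySem.Dict.getD RANK_VALUE r 0) true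

-- ===== PORT B =====
-- B's while loop: tally ranks into counts (a dict) instead of collecting a list
def count_loop : List Char → PySem.Dict String Int → PySem.Dict String Int
  | '1' :: '0' :: rest, counts => count_loop rest (counts.insert "T" (counts.getD "T" 0 + 1))
  | c :: rest, counts =>
    let t := PySem.Dict.getD RANK_TRANSLATE (String.ofList [c]) (String.ofList [c])
    match PySem.Str.isIn t RANK_ORDER with
    | true => count_loop rest (counts.insert t (counts.getD t 0 + 1))
    | false => count_loop rest counts
  | [], counts => counts

def normalize_hand_part_py_alt (part : String) : List String :=
  if part.toList = [] then []
  else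
    let clean := PySem.Str.upper
      (PySem.Str.replace (PySem.Str.replace (PySem.Str.replace part "-" "") "—" "") " " "")
    let counts := count_loop clean.toList PySem.Dict.empty
    -- [r for r in _RANK_ORDER for _ in range(counts.get(r, 0))]
    RANK_ORDER.toList.flatMap
      (fun r => List.replicate (counts.getD (String.ofList [r]) 0).toNat (String.ofList [r]))

-- ===== PRECONDITION & SPEC =====
def Spec_normalize_hand_part_py (part : String) (out : List String) : Prop := out = normalize_hand_part_py_alt part
instance (part : String) (out : List String) : Decidable (Spec_normalize_hand_part_py part out) := by unfold Spec_normalize_hand_part_py; infer_instance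

-- ===== CLAIM (what is proved, stated in full; the proofs are below) =====
def Claim_equal_normalize_hand_part_py : Prop := ∀ (part : String), Dom_normalize_hand_part_py part → Spec_normalize_hand_part_py part (normalize_hand_part_py part)

-- ===== LEMMAS AND PROOFS =====

-- the 13 rank strings, in A's descending sort order = B's emission order
def RANKS : List String := RANK_ORDER.toList.map (fun c => String.ofList [c])

def keyv (r : String) : Int := PySem.Dict.getD RANK_VALUE r 0

lemma upperChar_idem (c : Char) :
    PySem.Chars.upperChar (PySem.Chars.upperChar c) = PySem.Chars.upperChar c := by
  simp only [PySem.Chars.upperChar, PySem.Chars.islower]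
  split_ifs with h1 h2
  · exfalso
    simp only [Bool.and_eq_true, decide_eq_true_eq] at h1 h2
    have ha : 97 ≤ c.toNat := h1.1
    have hb : c.toNat ≤ 122 := h1.2
    have hv : (c.toNat - 32).isValidChar := by left; omega
    have ht : (Char.ofNat (c.toNat - 32)).toNat = c.toNat - 32 := by
      rw [Char.toNat_ofNat]; simp [hv]
    have : 97 ≤ (Char.ofNat (c.toNat - 32)).toNat := h2.1
    omega
  · rfl
  · simp

lemma mem_upper_fixed {l : List Char} {c : Char} (h : c ∈ PySem.Chars.upper l) :
    PySem.Chars.upperChar c = c := by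
  simp only [PySem.Chars.upper, List.mem_map] at h
  obtain ⟨a, -, rfl⟩ := h
  exact upperChar_idem a

lemma ofList_ne_of_ne {c d : Char} (h : c ≠ d) : String.ofList [c] ≠ String.ofList [d] := by
  intro he; exact h (by simpa using congrArg String.toList he)

lemma getD_trans_of_not_key (c : Char) (h1 : c ≠ 'E') (h2 : c ≠ 'K') (h3 : c ≠ 'D')
    (h4 : c ≠ 'B') (h5 : c ≠ 'T') :
    PySem.Dict.getD RANK_TRANSLATE (String.ofList [c]) (String.ofList [c]) = String.ofList [c] := by
  have hTR : RANK_TRANSLATE = PySem.Dict.mk [("E","A"),("K","K"),("D","Q"),("B","J"),("T","T")] := by decide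
  have e1 : String.ofList [c] ≠ "E" := by simpa using ofList_ne_of_ne h1
  have e2 : String.ofList [c] ≠ "K" := by simpa using ofList_ne_of_ne h2
  have e3 : String.ofList [c] ≠ "D" := by simpa using ofList_ne_of_ne h3
  have e4 : String.ofList [c] ≠ "B" := by simpa using ofList_ne_of_ne h4
  have e5 : String.ofList [c] ≠ "T" := by simpa using ofList_ne_of_ne h5
  rw [hTR]
  simp [PySem.Dict.getD_eq_get?_getD, PySem.Dict.get?_mk_cons, PySem.Dict.get?,
    Ne.symm e1, Ne.symm e2, Ne.symm e3, Ne.symm e4, Ne.symm e5]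

lemma isIn_single_false (c : Char) (h : c ∉ RANK_ORDER.toList) :
    PySem.Str.isIn (String.ofList [c]) RANK_ORDER = false := by
  rw [Bool.eq_false_iff]
  intro hc
  rw [PySem.Str.isIn] at hc
  have := (PySem.Chars.isIn_iff_infix _ _).1 (by simpa using hc)
  rw [List.singleton_infix_iff] at this
  exact h this

lemma token_spec_sym (c : Char) (hu : PySem.Chars.upperChar c = c)
    (hS : c ∉ ("AKQJT98765432EDB".toList)) :
    normalize_rank_token (String.ofList [c]) =
      (let t := PySem.Dict.getD RANK_TRANSLATE (String.ofList [c]) (String.ofList [c])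
       if PySem.Str.isIn t RANK_ORDER then some t else none) := by
  rw [show ("AKQJT98765432EDB".toList) = ['A','K','Q','J','T','9','8','7','6','5','4','3','2','E','D','B'] from rfl] at hS
  simp only [List.mem_cons, List.not_mem_nil, or_false, not_or] at hS
  obtain ⟨n1,n2,n3,n4,n5,n6,n7,n8,n9,n10,n11,n12,n13,n14,n15,n16⟩ := hS
  have hg := getD_trans_of_not_key c n14 n2 n15 n16 n5
  have hin : PySem.Str.isIn (String.ofList [c]) RANK_ORDER = false := by
    apply isIn_single_false; intro hmem
    rw [show (RANK_ORDER.toList) = ['A','K','Q','J','T','9','8','7','6','5','4','3','2'] from rfl] at hmem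
    simp only [List.mem_cons, List.not_mem_nil, or_false] at hmem
    rcases hmem with rfl|rfl|rfl|rfl|rfl|rfl|rfl|rfl|rfl|rfl|rfl|rfl|rfl <;> simp_all
  have hin' : PySem.Chars.isIn [c] RANK_ORDER.toList = false := by
    simpa [PySem.Str.isIn] using hin
  have hrhs : (let t := PySem.Dict.getD RANK_TRANSLATE (String.ofList [c]) (String.ofList [c])
      if PySem.Str.isIn t RANK_ORDER then some t else none) = none := by
    simp [hg, hin, hin']
  rw [hrhs]
  by_cases hsp : PySem.Chars.isspace c = true
  · have hstrip : PySem.Chars.strip [c] = [] := by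
      simp [PySem.Chars.strip, PySem.Chars.lstrip, PySem.Chars.rstrip, hsp]
    simp only [normalize_rank_token, PySem.Str.upper, PySem.Str.strip]
    rw [show (String.ofList [c]).toList = [c] from by simp, hstrip]
    rfl
  · have hstrip : PySem.Chars.strip [c] = [c] := by
      simp [PySem.Chars.strip, PySem.Chars.lstrip, PySem.Chars.rstrip, hsp]
    simp only [normalize_rank_token, PySem.Str.upper, PySem.Str.strip]
    rw [show (String.ofList [c]).toList = [c] from by simp, hstrip]
    simp [PySem.Chars.upper, hu, PySem.Str.startswith, PySem.Chars.startswith,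
      List.isPrefixOf, hg, hin, hin']

-- per-character behaviour of A's token helper, for characters fixed by upper (as all of clean's are)
lemma token_spec (c : Char) (hu : PySem.Chars.upperChar c = c) :
    normalize_rank_token (String.ofList [c]) =
      (let t := PySem.Dict.getD RANK_TRANSLATE (String.ofList [c]) (String.ofList [c])
       if PySem.Str.isIn t RANK_ORDER then some t else none) := by
  by_cases hS : c ∈ ("AKQJT98765432EDB".toList)
  · rw [show ("AKQJT98765432EDB".toList) = ['A','K','Q','J','T','9','8','7','6','5','4','3','2','E','D','B'] from rfl] at hS
    simp only [List.mem_cons, List.not_mem_nil, or_false] at hS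
    rcases hS with rfl|rfl|rfl|rfl|rfl|rfl|rfl|rfl|rfl|rfl|rfl|rfl|rfl|rfl|rfl|rfl <;> decide
  · exact token_spec_sym c hu hS

lemma token_mem_ranks (c : Char)
    (h : PySem.Str.isIn (PySem.Dict.getD RANK_TRANSLATE (String.ofList [c]) (String.ofList [c]))
        RANK_ORDER = true) :
    PySem.Dict.getD RANK_TRANSLATE (String.ofList [c]) (String.ofList [c]) ∈ RANKS := by
  by_cases hK : c ∈ (['E','K','D','B','T'] : List Char)
  · simp only [List.mem_cons, List.not_mem_nil, or_false] at hK
    rcases hK with rfl|rfl|rfl|rfl|rfl <;> decide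
  · simp only [List.mem_cons, List.not_mem_nil, or_false, not_or] at hK
    obtain ⟨k1,k2,k3,k4,k5⟩ := hK
    rw [getD_trans_of_not_key c k1 k2 k3 k4 k5] at h ⊢
    rw [PySem.Str.isIn] at h
    have := (PySem.Chars.isIn_iff_infix _ _).1 (by simpa using h)
    rw [List.singleton_infix_iff] at this
    exact List.mem_map.2 ⟨c, this, rfl⟩

lemma parse_mem : ∀ (cs : List Char), (∀ c ∈ cs, PySem.Chars.upperChar c = c) →
    ∀ r ∈ parse_loop cs, r ∈ RANKS := by
  intro cs
  induction cs using parse_loop.induct with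
  | case1 rest ih =>
    intro hu r hr
    rw [parse_loop] at hr
    rcases List.mem_cons.1 hr with rfl | hr'
    · decide
    · exact ih (fun c hc => hu c (by simp [hc])) r hr'
  | case2 c rest hnot r0 heq ih =>
    intro hu r hr
    rw [parse_loop.eq_2 c rest hnot, heq] at hr
    rcases List.mem_cons.1 hr with rfl | hr'
    · have hc := hu c (by simp)
      rw [token_spec c hc] at heq
      by_cases hIn : PySem.Str.isIn
          (PySem.Dict.getD RANK_TRANSLATE (String.ofList [c]) (String.ofList [c])) RANK_ORDER = true
      · simp only [hIn, if_true] at heq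
        cases heq
        exact token_mem_ranks c hIn
      · rw [Bool.not_eq_true] at hIn
        simp only [hIn] at heq
        simp at heq
    · exact ih (fun c' hc' => hu c' (by simp [hc'])) r hr'
  | case3 c rest hnot heq ih =>
    intro hu r hr
    rw [parse_loop.eq_2 c rest hnot, heq] at hr
    exact ih (fun c' hc' => hu c' (by simp [hc'])) r hr
  | case4 =>
    intro _ r hr
    simp [parse_loop] at hr

lemma main_loop (cs : List Char) (d : PySem.Dict String Int) :
    (∀ c ∈ cs, PySem.Chars.upperChar c = c) → ∀ s : String,
    (count_loop cs d).getD s 0 = d.getD s 0 + ((parse_loop cs).count s : Int) := by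
  induction cs, d using count_loop.induct with
  | case1 rest counts ih =>
    intro hu s
    rw [count_loop.eq_1, parse_loop.eq_1]
    rw [ih (fun c hc => hu c (by simp [hc])) s]
    by_cases hsT : s = "T"
    · subst hsT
      simp [PySem.Dict.getD_insert, List.count_cons]
      push_cast
      ring
    · simp [PySem.Dict.getD_insert, hsT, List.count_cons, Ne.symm hsT]
  | case2 c rest counts hnot t ht ih =>
    intro hu s
    have htv : t = PySem.Dict.getD RANK_TRANSLATE (String.ofList [c]) (String.ofList [c]) := rfl
    rw [htv] at ht ih
    rw [count_loop.eq_2 counts c rest hnot]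
    simp only [ht]
    rw [parse_loop.eq_2 c rest hnot, token_spec c (hu c (by simp))]
    simp only [ht, if_true]
    rw [ih (fun c' hc' => hu c' (by simp [hc'])) s]
    set t' := PySem.Dict.getD RANK_TRANSLATE (String.ofList [c]) (String.ofList [c])
    by_cases hst : s = t'
    · subst hst
      simp [PySem.Dict.getD_insert, List.count_cons]
      push_cast
      ring
    · simp [PySem.Dict.getD_insert, hst, List.count_cons, Ne.symm hst]
  | case3 c rest counts hnot t ht ih =>
    intro hu s
    have htv : t = PySem.Dict.getD RANK_TRANSLATE (String.ofList [c]) (String.ofList [c]) := rfl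
    rw [htv] at ht
    rw [count_loop.eq_2 counts c rest hnot]
    simp only [ht]
    rw [parse_loop.eq_2 c rest hnot, token_spec c (hu c (by simp))]
    simp only [ht, Bool.false_eq_true, if_false]
    exact ih (fun c' hc' => hu c' (by simp [hc'])) s
  | case4 counts =>
    intro _ s
    simp [count_loop, parse_loop]

lemma perm_flatMap_count {α : Type} [DecidableEq α] (R : List α) (hR : R.Nodup) :
    ∀ L : List α, (∀ x ∈ L, x ∈ R) →
      (R.flatMap (fun r => List.replicate (L.count r) r)).Perm L := by
  induction R with
  | nil =>
    intro L hL
    cases L with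
    | nil => simp
    | cons x xs => exact absurd (hL x (by simp)) (by simp)
  | cons r R ih =>
    intro L hL
    rw [List.flatMap_cons]
    rw [List.nodup_cons] at hR
    set L2 := L.filter (fun y => !decide (y = r)) with hL2
    have hflat : R.flatMap (fun x => List.replicate (L.count x) x) =
        R.flatMap (fun x => List.replicate (L2.count x) x) := by
      rw [List.flatMap_def, List.flatMap_def]
      congr 1
      apply List.map_congr_left
      intro x hx
      have hxr : x ≠ r := fun h => hR.1 (h ▸ hx)
      have : L2.count x = L.count x := List.count_filter (by simp [hxr])
      rw [this]
    rw [hflat]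
    have ih2 := ih hR.2 L2 (fun x hx => by
      have hm := List.mem_filter.1 hx
      have hcr : x ∈ r :: R := hL x hm.1
      rcases List.mem_cons.1 hcr with rfl | h
      · simp at hm
      · exact h)
    have hlast : (List.replicate (L.count r) r ++ L2).Perm L := by
      rw [← List.filter_eq r, hL2]
      exact List.filter_append_perm _ L
    exact (List.Perm.append_left _ ih2).trans hlast

lemma pairwise_flatMap_replicate {α : Type} (key : α → Int) (R : List α)
    (hR : R.Pairwise (fun a b => key b ≤ key a)) (n : α → Nat) :
    (R.flatMap (fun r => List.replicate (n r) r)).Pairwise (fun a b => key b ≤ key a) := by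
  induction R with
  | nil => simp
  | cons r R ih =>
    rw [List.flatMap_cons, List.pairwise_append]
    refine ⟨List.pairwise_replicate.2 (Or.inr le_rfl), ih hR.of_cons, ?_⟩
    intro x hx y hy
    obtain rfl := List.eq_of_mem_replicate hx
    obtain ⟨b, hbR, hyb⟩ := List.mem_flatMap.1 hy
    obtain rfl := List.eq_of_mem_replicate hyb
    exact (List.pairwise_cons.1 hR).1 _ hbR

lemma ranks_key_inj : ∀ a ∈ RANKS, ∀ b ∈ RANKS, keyv a = keyv b → a = b := by decide

lemma ranks_pairwise : RANKS.Pairwise (fun a b => keyv b ≤ keyv a) := by decide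

lemma ranks_contains : ∀ r ∈ RANKS, PySem.Dict.contains RANK_VALUE r = true := by decide

-- A's sort equals B's emission, for any list of rank strings
lemma sorted_eq_emit (L : List String) (hL : ∀ x ∈ L, x ∈ RANKS) :
    PySem.List.sorted L keyv true = RANKS.flatMap (fun r => List.replicate (L.count r) r) := by
  have hperm : (RANKS.flatMap fun r => List.replicate (L.count r) r).Perm L :=
    perm_flatMap_count RANKS (by decide) L hL
  refine List.Perm.eq_of_pairwise (le := fun a b => keyv b ≤ keyv a) ?_
    (PySem.List.sorted_pairwise_rev L keyv)
    (pairwise_flatMap_replicate keyv RANKS ranks_pairwise _)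
    ((PySem.List.sorted_perm L keyv true).trans hperm.symm)
  intro a b ha hb h1 h2
  have haR : a ∈ RANKS := hL a ((PySem.List.mem_sorted L keyv true a).1 ha)
  have hbR : b ∈ RANKS := by
    obtain ⟨rr, hrr, hb'⟩ := List.mem_flatMap.1 hb
    exact (List.eq_of_mem_replicate hb') ▸ hrr
  exact ranks_key_inj a haR b hbR (le_antisymm h2 h1)

-- ===== VERDICT (by name: the statement is the Claim_ definition above) =====
theorem normalize_hand_part_py_spec : Claim_equal_normalize_hand_part_py := by
  unfold Claim_equal_normalize_hand_part_py
  intro part _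
  unfold Spec_normalize_hand_part_py normalize_hand_part_py normalize_hand_part_py_alt
  by_cases hp : part.toList = []
  · simp [hp]
  · simp only [hp, if_false]
    set z := PySem.Str.replace (PySem.Str.replace (PySem.Str.replace part "-" "") "—" "") " " ""
    have hu : ∀ c ∈ (PySem.Str.upper z).toList, PySem.Chars.upperChar c = c := by
      intro c hc
      rw [show (PySem.Str.upper z).toList = PySem.Chars.upper z.toList from by
        simp [PySem.Str.upper]] at hc
      exact mem_upper_fixed hc
    set cs := (PySem.Str.upper z).toList
    set L := parse_loop cs
    have hmem : ∀ r ∈ L, r ∈ RANKS := parse_mem cs hu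
    have hfilter : L.filter (fun r => PySem.Dict.contains RANK_VALUE r) = L :=
      List.filter_eq_self.2 (fun r hr => ranks_contains r (hmem r hr))
    rw [hfilter]
    have hcount : ∀ s, (count_loop cs PySem.Dict.empty).getD s 0 = (L.count s : Int) := by
      intro s
      rw [main_loop cs PySem.Dict.empty hu s, PySem.Dict.getD_empty]
      ring
    rw [show (fun r => PySem.Dict.getD RANK_VALUE r 0) = keyv from rfl]
    rw [sorted_eq_emit L hmem]
    simp only [hcount, Int.toNat_natCast]
    rw [show RANKS = RANK_ORDER.toList.map (fun c => String.ofList [c]) from rfl,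
      List.flatMap_map]
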